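-- pv_equiv track=rewrite | github.com/Rossettaylm/dotfiles | tmux/scripts/gen_keybinds.py | quote_format_vars
-- ===== SOURCE A (Python) =====
-- def quote_format_vars(cmd: str) -> str:
--     """Ensure #{...} variables in tmux commands are properly quoted.
--
--     Wraps bare #{...} tokens (those not already inside quotes) with double quotes.
--     e.g. 'split-window -v -c #{pane_current_path}' ->
--          'split-window -v -c "#{pane_current_path}"'
--
--     Leaves #{...} inside quoted strings untouched.
--     """
--     if "#{" not in cmd:
--         return cmd
--
--     result = []
--     i = 0
--     in_double = False
--     in_single = False
--     while i < len(cmd):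
--         ch = cmd[i]
--         if ch == '"' and not in_single:
--             in_double = not in_double
--             result.append(ch)
--             i += 1
--         elif ch == "'" and not in_double:
--             in_single = not in_single
--             result.append(ch)
--             i += 1
--         elif cmd[i:i+2] == '#{' and not in_double and not in_single:
--             # Find closing }
--             end = cmd.find('}', i)
--             if end == -1:
--                 result.append(ch)
--                 i += 1
--             else:
--                 token = cmd[i:end+1]
--                 result.append(f'"{token}"')
--                 i = end + 1
--         else:
--             result.append(ch)
--             i += 1
--     return "".join(result)
-- ===== SOURCE B (Python) =====
-- def quote_format_vars(cmd: str) -> str: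
--     """Span-based rewriter: consume whole quoted spans / #{...} tokens at once."""
--     out = []
--     i = 0
--     n = len(cmd)
--     while i < n:
--         ch = cmd[i]
--         if ch == '"' or ch == "'":
--             j = cmd.find(ch, i + 1)
--             if j == -1:
--                 out.append(cmd[i:])
--                 i = n
--             else:
--                 out.append(cmd[i:j + 1])
--                 i = j + 1
--         elif cmd.startswith('#{', i):
--             j = cmd.find('}', i)
--             if j == -1:
--                 out.append(cmd[i:])
--                 i = n
--             else:
--                 out.append('"' + cmd[i:j + 1] + '"')
--                 i = j + 1
--         else:
--             out.append(ch)
--             i += 1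
--     return ''.join(out)
-- ===== Notes on version B (the rewrite author's own statement) =====
-- stated objective: alternative
-- what changed: Replaced A's char-by-char state machine with in_double/in_single boolean flags by a flagless scanner that consumes a whole quoted span or a whole #{...} token (or the verbatim tail, when unterminated) in a single find-based step.
import Mathlib
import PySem

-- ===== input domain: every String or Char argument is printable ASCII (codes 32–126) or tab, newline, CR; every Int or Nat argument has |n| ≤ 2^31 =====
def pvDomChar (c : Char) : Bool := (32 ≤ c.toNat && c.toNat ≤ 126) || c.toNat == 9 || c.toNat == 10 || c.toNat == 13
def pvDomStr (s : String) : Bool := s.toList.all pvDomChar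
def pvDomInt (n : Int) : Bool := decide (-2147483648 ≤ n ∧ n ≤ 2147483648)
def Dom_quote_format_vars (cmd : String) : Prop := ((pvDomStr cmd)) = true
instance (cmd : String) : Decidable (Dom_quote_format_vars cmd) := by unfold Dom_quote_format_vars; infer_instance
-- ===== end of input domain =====

-- B replaces A's char-by-char scanner with in_double/in_single boolean flags by a
-- flagless scanner that consumes a whole quoted span or #{...} token per step: objective 'alternative'.

-- ===== PORT A =====

-- splits l at the first '}' (Python cmd.find('}', i)): some (tok, rem) with tok ending in '}'
def pvFindBrace : List Char → Option (List Char × List Char)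
  | [] => none
  | c :: rest =>
    if c = '}' then some ([c], rest)
    else
      match pvFindBrace rest with
      | none => none
      | some (tok, rem) => some (c :: tok, rem)

theorem pvFindBrace_length : ∀ (l tok rem : List Char),
    pvFindBrace l = some (tok, rem) → rem.length < l.length := by
  intro l
  induction l with
  | nil => intro tok rem h; simp [pvFindBrace] at h
  | cons c rest ih =>
    intro tok rem h
    by_cases hc : c = '}'
    · simp [pvFindBrace, hc] at h
      simp [← h.2, List.length_cons]
    · simp [pvFindBrace, hc] at h
      cases hfb : pvFindBrace rest with
      | none => rw [hfb] at h; simp at h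
      | some p =>
        rw [hfb] at h
        obtain ⟨tok', rem'⟩ := p
        simp at h
        have := ih tok' rem' hfb
        simp [← h.2, List.length_cons]; omega

-- does the string start with '#{' (Python cmd[i:i+2] == '#{')
def pvStartsHB : List Char → Bool
  | '#' :: '{' :: _ => true
  | _ => false

-- Python '"#{" in cmd' (substring search, exact for this two-char pattern)
def pvHasHB : List Char → Bool
  | [] => false
  | c :: rest => pvStartsHB (c :: rest) || pvHasHB rest

-- A's while loop: index i becomes the remaining suffix, flags in_double/in_single carried
def pvLoopA : List Char → Bool → Bool → List Char
  | [], _, _ => []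
  | c :: rest, ind, ins =>
    if c = '"' ∧ ins = false then
      c :: pvLoopA rest (!ind) ins
    else if c = '\'' ∧ ind = false then
      c :: pvLoopA rest ind (!ins)
    else if pvStartsHB (c :: rest) = true ∧ ind = false ∧ ins = false then
      match h : pvFindBrace (c :: rest) with
      | none => c :: pvLoopA rest ind ins
      | some (tok, rem) => '"' :: (tok ++ '"' :: pvLoopA rem ind ins)
    else
      c :: pvLoopA rest ind ins
  termination_by l => l.length
  decreasing_by
    · simp
    · simp
    · simp
    · exact pvFindBrace_length _ _ _ h
    · simp

def quote_format_vars (cmd : String) : String :=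
  if pvHasHB cmd.toList = false then cmd
  else String.ofList (pvLoopA cmd.toList false false)

-- ===== PORT B =====

-- splits l at the first occurrence of q (Python cmd.find(ch, i+1)): pre includes the quote
def pvFindQ (q : Char) : List Char → Option (List Char × List Char)
  | [] => none
  | c :: rest =>
    if c = q then some ([c], rest)
    else
      match pvFindQ q rest with
      | none => none
      | some (pre, rem) => some (c :: pre, rem)

theorem pvFindQ_length : ∀ (q : Char) (l pre rem : List Char),
    pvFindQ q l = some (pre, rem) → rem.length < l.length := by
  intro q l
  induction l with
  | nil => intro pre rem h; simp [pvFindQ] at h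
  | cons c rest ih =>
    intro pre rem h
    by_cases hc : c = q
    · simp [pvFindQ, hc] at h
      simp [← h.2, List.length_cons]
    · simp [pvFindQ, hc] at h
      cases hfb : pvFindQ q rest with
      | none => rw [hfb] at h; simp at h
      | some p =>
        rw [hfb] at h
        obtain ⟨pre', rem'⟩ := p
        simp at h
        have := ih pre' rem' hfb
        simp [← h.2, List.length_cons]; omega

-- B's while loop: each step consumes a whole quoted span, a whole #{...} token, or one char
def pvLoopB : List Char → List Char
  | [] => []
  | c :: rest =>
    if c = '"' ∨ c = '\'' then
      match h : pvFindQ c rest with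
      | none => c :: rest
      | some (pre, rem) => c :: (pre ++ pvLoopB rem)
    else if pvStartsHB (c :: rest) = true then
      match h : pvFindBrace (c :: rest) with
      | none => c :: rest
      | some (tok, rem) => '"' :: (tok ++ '"' :: pvLoopB rem)
    else
      c :: pvLoopB rest
  termination_by l => l.length
  decreasing_by
    · exact Nat.lt_succ_of_lt (pvFindQ_length _ _ _ _ h)
    · exact pvFindBrace_length _ _ _ h
    · simp

def quote_format_vars_alt (cmd : String) : String :=
  String.ofList (pvLoopB cmd.toList)

-- ===== PRECONDITION & SPEC =====
def Spec_quote_format_vars (cmd : String) (out : String) : Prop := out = quote_format_vars_alt cmd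
instance (cmd : String) (out : String) : Decidable (Spec_quote_format_vars cmd out) := by unfold Spec_quote_format_vars; infer_instance

-- ===== CLAIM (what is proved, stated in full; the proofs are below) =====
def Claim_equal_quote_format_vars : Prop := ∀ (cmd : String), Dom_quote_format_vars cmd → Spec_quote_format_vars cmd (quote_format_vars cmd)

-- ===== LEMMAS AND PROOFS =====

theorem pvFindQ_append : ∀ (q : Char) (l pre rem : List Char),
    pvFindQ q l = some (pre, rem) → pre ++ rem = l := by
  intro q l
  induction l with
  | nil => intro pre rem h; simp [pvFindQ] at h
  | cons c rest ih =>
    intro pre rem h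
    by_cases hc : c = q
    · rw [pvFindQ, if_pos hc] at h
      simp at h
      rw [← h.1, ← h.2]
      simp
    · rw [pvFindQ, if_neg hc] at h
      cases hfb : pvFindQ q rest with
      | none => rw [hfb] at h; simp at h
      | some p =>
        rw [hfb] at h
        obtain ⟨pre', rem'⟩ := p
        simp at h
        rw [← h.1, ← h.2]
        simp [ih pre' rem' hfb]

theorem pvFindBrace_none_cons (c : Char) (rest : List Char)
    (h : pvFindBrace (c :: rest) = none) : pvFindBrace rest = none := by
  rw [pvFindBrace] at h
  split_ifs at h with hc
  cases hfb : pvFindBrace rest with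
  | none => rfl
  | some p => rw [hfb] at h; obtain ⟨a, b⟩ := p; simp at h

-- when no '}' remains, A's loop copies the rest verbatim (quotes only toggle flags)
theorem pvFindBrace_none_loopA : ∀ (l : List Char) (b s : Bool),
    pvFindBrace l = none → pvLoopA l b s = l := by
  intro l
  induction l with
  | nil => intro b s _; rw [pvLoopA]
  | cons c rest ih =>
    intro b s hn
    have hr : pvFindBrace rest = none := pvFindBrace_none_cons c rest hn
    rw [pvLoopA]
    split_ifs with h1 h2 h3
    · simp [ih _ _ hr]
    · simp [ih _ _ hr]
    · cases hfb : pvFindBrace (c :: rest) with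
      | none => simp [ih _ _ hr]
      | some p => rw [hfb] at hn; obtain ⟨a, b'⟩ := p; simp at hn
    · simp [ih _ _ hr]

theorem pvHasHB_cons (c : Char) (rest : List Char)
    (h : pvHasHB (c :: rest) = false) :
    pvStartsHB (c :: rest) = false ∧ pvHasHB rest = false := by
  rw [pvHasHB] at h
  exact ⟨(Bool.or_eq_false_iff.mp h).1, (Bool.or_eq_false_iff.mp h).2⟩

theorem pvHasHB_suffix : ∀ (l rem : List Char), rem <:+ l → pvHasHB l = false → pvHasHB rem = false := by
  intro l
  induction l with
  | nil => intro rem h _; rw [List.suffix_nil.mp h]; rfl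
  | cons c rest ih =>
    intro rem h hf
    rcases List.suffix_cons_iff.mp h with h1 | h2
    · rw [h1]; exact hf
    · exact ih rem h2 (pvHasHB_cons c rest hf).2

theorem pvLoopB_id_fuel : ∀ (n : Nat) (l : List Char), l.length ≤ n →
    pvHasHB l = false → pvLoopB l = l := by
  intro n
  induction n with
  | zero =>
    intro l hl _
    rw [List.length_eq_zero_iff.mp (Nat.le_zero.mp hl)]
    rw [pvLoopB]
  | succ n ih =>
    intro l hl hf
    cases l with
    | nil => rw [pvLoopB]
    | cons c rest =>
      have hsb := (pvHasHB_cons c rest hf).1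
      have hrest := (pvHasHB_cons c rest hf).2
      have hlen : rest.length ≤ n := by simp at hl; omega
      rw [pvLoopB]
      split_ifs with h1 h2
      · cases hq : pvFindQ c rest with
        | none => simp
        | some p =>
          obtain ⟨pre, rem⟩ := p
          have happ := pvFindQ_append c rest pre rem hq
          have hrem : pvHasHB rem = false :=
            pvHasHB_suffix rest rem ⟨pre, happ⟩ hrest
          have hrlen : rem.length ≤ n := by
            have := pvFindQ_length c rest pre rem hq; omega
          simp [ih rem hrlen hrem, happ]
      · rw [hsb] at h2; simp at h2
      · rw [ih rest hlen hrest]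

theorem pvLoopB_id (l : List Char) (hf : pvHasHB l = false) : pvLoopB l = l :=
  pvLoopB_id_fuel l.length l (Nat.le_refl _) hf

-- B's treatment of the rest of a quoted span, used to describe A's loop in the quoted states
def pvQSpan (q : Char) (l : List Char) : List Char :=
  match pvFindQ q l with
  | none => l
  | some (pre, rem) => pre ++ pvLoopB rem

theorem pvMain : ∀ (n : Nat) (l : List Char), l.length ≤ n →
    (pvLoopA l false false = pvLoopB l) ∧
    (pvLoopA l true false = pvQSpan '"' l) ∧
    (pvLoopA l false true = pvQSpan '\'' l) := by
  intro n
  induction n with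
  | zero =>
    intro l hl
    rw [List.length_eq_zero_iff.mp (Nat.le_zero.mp hl)]
    refine ⟨by rw [pvLoopA, pvLoopB], ?_, ?_⟩ <;>
      · rw [pvLoopA]; simp [pvQSpan, pvFindQ]
  | succ n ih =>
    intro l hl
    cases l with
    | nil =>
      refine ⟨by rw [pvLoopA, pvLoopB], ?_, ?_⟩ <;>
        · rw [pvLoopA]; simp [pvQSpan, pvFindQ]
    | cons c rest =>
      have hlen : rest.length ≤ n := by simp at hl; omega
      have i1 := (ih rest hlen).1
      have i2 := (ih rest hlen).2.1
      have i3 := (ih rest hlen).2.2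
      refine ⟨?_, ?_, ?_⟩
      · -- state (false, false)
        by_cases hdq : c = '"'
        · subst hdq
          rw [pvLoopA, pvLoopB]
          cases hq : pvFindQ '"' rest with
          | none => simp [i2, pvQSpan, hq]
          | some p => obtain ⟨pre, rem⟩ := p; simp [i2, pvQSpan, hq]
        · by_cases hsq : c = '\''
          · subst hsq
            rw [pvLoopA, pvLoopB]
            cases hq : pvFindQ '\'' rest with
            | none => simp [i3, pvQSpan, hq]
            | some p => obtain ⟨pre, rem⟩ := p; simp [i3, pvQSpan, hq]
          · by_cases hhb : pvStartsHB (c :: rest) = true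
            · rw [pvLoopA, pvLoopB]
              cases hfb : pvFindBrace (c :: rest) with
              | none =>
                have := pvFindBrace_none_loopA rest false false (pvFindBrace_none_cons c rest hfb)
                simp [hdq, hsq, hhb, this]
              | some p =>
                obtain ⟨tok, rem⟩ := p
                have hrlen : rem.length ≤ n := by
                  have := pvFindBrace_length (c :: rest) tok rem hfb
                  simp at this hl; omega
                have := (ih rem hrlen).1
                simp [hdq, hsq, hhb, this]
            · rw [pvLoopA, pvLoopB]
              simp [hdq, hsq, hhb, i1]
      · -- state (true, false): everything until the next '"' is verbatim
        by_cases hdq : c = '"'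
        · subst hdq
          rw [pvLoopA]
          simp [i1, pvQSpan, pvFindQ]
        · rw [pvLoopA]
          cases hq : pvFindQ '"' rest with
          | none => simp [hdq, i2, pvQSpan, pvFindQ, hq]
          | some p => obtain ⟨pre, rem⟩ := p; simp [hdq, i2, pvQSpan, pvFindQ, hq]
      · -- state (false, true): everything until the next '\'' is verbatim
        by_cases hsq : c = '\''
        · subst hsq
          rw [pvLoopA]
          simp [i1, pvQSpan, pvFindQ]
        · rw [pvLoopA]
          cases hq : pvFindQ '\'' rest with
          | none => simp [hsq, i3, pvQSpan, pvFindQ, hq]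
          | some p => obtain ⟨pre, rem⟩ := p; simp [hsq, i3, pvQSpan, pvFindQ, hq]

-- ===== VERDICT (by name: the statement is the Claim_ definition above) =====
theorem quote_format_vars_spec : Claim_equal_quote_format_vars := by
  intro cmd _
  unfold Spec_quote_format_vars quote_format_vars quote_format_vars_alt
  by_cases hg : pvHasHB cmd.toList = false
  · rw [if_pos hg, pvLoopB_id cmd.toList hg, String.ofList_toList]
  · rw [if_neg hg, (pvMain cmd.toList.length cmd.toList (Nat.le_refl _)).1]
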